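-- pv_equiv track=rewrite | github.com/wdchenxyz/python-algorithms | stack/switch_pairs.py | switch_pairs
-- ===== SOURCE A (Python) =====
-- def switch_pairs(stack):
--
--     stack_storage = []
--     for _ in range(len(stack)):
--         stack_storage.append(stack.pop())
--
--     for _ in range(len(stack_storage)):
--         if len(stack_storage) == 0:
--             break
--         first_element = stack_storage.pop()
--         if len(stack_storage) == 0:
--             stack.append(first_element)
--             break
--         second_element = stack_storage.pop()
--         stack.append(second_element)
--         stack.append(first_element)
--     return stack
-- ===== SOURCE B (Python) =====
-- def switch_pairs(stack):
--     for i in range(1, len(stack), 2):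
--         stack[i - 1], stack[i] = stack[i], stack[i - 1]
--     return stack
-- ===== Notes on version B (the rewrite author's own statement) =====
-- stated objective: simpler
-- what changed: Replaces A's two destructive pop/append passes through an auxiliary storage stack by a single in-place indexed loop that swaps each adjacent pair directly (stack[i-1], stack[i] = stack[i], stack[i-1] for odd i); no auxiliary list, one pass instead of two.
import Mathlib
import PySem

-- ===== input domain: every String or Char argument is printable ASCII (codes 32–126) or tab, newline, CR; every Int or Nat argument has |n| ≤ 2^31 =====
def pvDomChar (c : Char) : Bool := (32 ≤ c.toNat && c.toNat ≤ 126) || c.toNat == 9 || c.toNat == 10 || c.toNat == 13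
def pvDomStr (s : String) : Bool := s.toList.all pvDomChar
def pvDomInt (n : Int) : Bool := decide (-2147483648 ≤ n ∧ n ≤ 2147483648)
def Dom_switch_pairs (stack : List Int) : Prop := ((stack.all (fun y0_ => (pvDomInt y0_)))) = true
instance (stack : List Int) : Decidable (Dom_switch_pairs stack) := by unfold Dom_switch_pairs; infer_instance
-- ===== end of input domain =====

-- B replaces A's two destructive pop/append passes through an auxiliary storage list by one
-- in-place indexed loop swapping each adjacent pair; both versions mutate the argument in
-- Python (A empties and refills it, B swaps in place) — the claim is about the return value.

-- ===== PORT A =====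
-- first loop: 'for _ in range(len(stack)): stack_storage.append(stack.pop())'
-- state is (stack, stack_storage); pop() = remove last element (never empty on reachable
-- states since the fuel equals the initial length, so the getD 0 default is never used)
def pvPopLoop : Nat → List Int → List Int → (List Int × List Int)
  | 0, st, sto => (st, sto)
  | n + 1, st, sto => pvPopLoop n st.dropLast (sto ++ [(st.getLast?).getD 0])

-- second loop: 'for _ in range(len(stack_storage)): …' with the two breaks, appending into stack
def pvPairLoop : Nat → List Int → List Int → List Int
  | 0, _, st => st
  | n + 1, sto, st =>
    if sto.length = 0 then st
    else
      let first := (sto.getLast?).getD 0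
      let sto1 := sto.dropLast
      if sto1.length = 0 then st ++ [first]
      else
        let second := (sto1.getLast?).getD 0
        let sto2 := sto1.dropLast
        pvPairLoop n sto2 (st ++ [second] ++ [first])

def switch_pairs (stack : List Int) : List Int :=
  let p := pvPopLoop stack.length stack []
  pvPairLoop p.2.length p.2 p.1

-- ===== PORT B =====
-- loop body 'stack[i-1], stack[i] = stack[i], stack[i-1]': the right-hand tuple is read
-- first, then the two cells are assigned in order; i comes from range(1, len, 2), so
-- 1 ≤ i < len and both reads are in range (getD 0 never used) and .toNat is exact
def pvSwapStep (l : List Int) (i : Int) : List Int :=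
  let t := ((PySem.List.pyGet? l i).getD 0, (PySem.List.pyGet? l (i - 1)).getD 0)
  let l1 := l.set (i - 1).toNat t.1
  l1.set i.toNat t.2

-- 'for i in range(1, len(stack), 2): …; return stack'
def switch_pairs_alt (stack : List Int) : List Int :=
  (PySem.List.pyRange 1 stack.length 2).foldl pvSwapStep stack

-- ===== PRECONDITION & SPEC =====
def Spec_switch_pairs (stack : List Int) (out : List Int) : Prop := out = switch_pairs_alt stack
instance (stack : List Int) (out : List Int) : Decidable (Spec_switch_pairs stack out) := by unfold Spec_switch_pairs; infer_instance

-- ===== CLAIM (what is proved, stated in full; the proofs are below) =====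
def Claim_equal_switch_pairs : Prop := ∀ (stack : List Int), Dom_switch_pairs stack → Spec_switch_pairs stack (switch_pairs stack)

-- ===== LEMMAS AND PROOFS =====

-- the common value of both programs: adjacent pairs swapped, odd trailing element kept
def pvPairSwap : List Int → List Int
  | a :: b :: rest => b :: a :: pvPairSwap rest
  | l => l

-- ---- A-side ----

-- the first pass empties the stack and leaves its reverse in storage
theorem pvPopLoop_eq (st : List Int) : ∀ sto : List Int,
    pvPopLoop st.length st sto = ([], sto ++ st.reverse) := by
  induction st using List.reverseRecOn with
  | nil => intro sto; simp [pvPopLoop]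
  | append_singleton ys y ih =>
      intro sto
      have h : (ys ++ [y]).length = ys.length + 1 := by simp
      rw [h]
      simp only [pvPopLoop, List.dropLast_concat, List.getLast?_concat, Option.getD_some]
      rw [ih]
      simp

-- the second pass, run on the reverse of s with enough fuel, appends the pairwise swap of s
theorem pvPairLoop_eq : ∀ (fuel : Nat) (s acc : List Int), s.length ≤ fuel →
    pvPairLoop fuel s.reverse acc = acc ++ pvPairSwap s := by
  intro fuel
  induction fuel with
  | zero =>
      intro s acc h
      have : s = [] := List.eq_nil_of_length_eq_zero (Nat.le_zero.mp h)
      subst this; simp [pvPairLoop, pvPairSwap]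
  | succ n ih =>
      intro s acc h
      match s with
      | [] => simp [pvPairLoop, pvPairSwap]
      | [a] => simp [pvPairLoop, pvPairSwap]
      | a :: b :: r =>
          have hrev : (a :: b :: r).reverse = (r.reverse ++ [b]) ++ [a] := by simp
          rw [hrev]
          simp only [pvPairLoop, List.length_append, List.length_singleton,
            List.dropLast_concat, List.getLast?_concat, Option.getD_some]
          rw [if_neg (Nat.succ_ne_zero _), if_neg (Nat.succ_ne_zero _)]
          have hr : r.length ≤ n := by simp at h; omega
          rw [ih r (acc ++ [b] ++ [a]) hr]
          simp [pvPairSwap]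

theorem switch_pairs_eq_pvPairSwap (stack : List Int) : switch_pairs stack = pvPairSwap stack := by
  unfold switch_pairs
  rw [pvPopLoop_eq stack []]
  simp only [List.nil_append]
  have := pvPairLoop_eq stack.reverse.length stack []
  simpa using this (by simp)

-- ---- B-side ----

-- a swap at index i+2 (1 <= i) leaves the first two cells alone and acts on the tail at i
theorem pvSwapStep_shift (i : Int) (hi : 1 ≤ i) (x y : Int) (r : List Int) :
    pvSwapStep (x :: y :: r) (i + 2) = x :: y :: pvSwapStep r i := by
  obtain ⟨j, rfl⟩ : ∃ j : Nat, i = (j : Int) + 1 := ⟨(i - 1).toNat, by omega⟩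
  have p1 : PySem.List.pyGet? (x :: y :: r) ((j : Int) + 1 + 2) = r[j + 1]? := by
    rw [show ((j : Int) + 1 + 2) = (((j + 3 : Nat)) : Int) from by push_cast; ring,
      PySem.List.pyGet?_natCast]
    simp
  have p2 : PySem.List.pyGet? (x :: y :: r) ((j : Int) + 1 + 2 - 1) = r[j]? := by
    rw [show ((j : Int) + 1 + 2 - 1) = (((j + 2 : Nat)) : Int) from by push_cast; ring,
      PySem.List.pyGet?_natCast]
    simp
  have p3 : PySem.List.pyGet? r ((j : Int) + 1) = r[j + 1]? := by
    rw [show ((j : Int) + 1) = (((j + 1 : Nat)) : Int) from by push_cast; ring,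
      PySem.List.pyGet?_natCast]
  have p4 : PySem.List.pyGet? r ((j : Int) + 1 - 1) = r[j]? := by
    rw [show ((j : Int) + 1 - 1) = (((j : Nat)) : Int) from by omega,
      PySem.List.pyGet?_natCast]
  have t1 : ((j : Int) + 1 + 2).toNat = (j + 1) + 2 := by omega
  have t2 : ((j : Int) + 1 + 2 - 1).toNat = j + 2 := by omega
  have t3 : ((j : Int) + 1).toNat = j + 1 := by omega
  have t4 : ((j : Int) + 1 - 1).toNat = j := by omega
  simp only [pvSwapStep, p1, p2, p3, p4, t1, t2, t3, t4]
  simp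

-- folding swaps at shifted indices acts below the first two cells
theorem pvFold_shift (L : List Int) : (∀ i ∈ L, 1 ≤ i) → ∀ (x y : Int) (r : List Int),
    List.foldl pvSwapStep (x :: y :: r) (L.map (· + 2)) =
      x :: y :: List.foldl pvSwapStep r L := by
  induction L with
  | nil => intro _ x y r; simp
  | cons i L ih =>
      intro hL x y r
      simp only [List.map_cons, List.foldl_cons,
        pvSwapStep_shift i (hL i (List.mem_cons_self)) x y r]
      exact ih (fun i hi => hL i (List.mem_cons_of_mem _ hi)) x y (pvSwapStep r i)

-- the swap at index 1 on a :: b :: r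
theorem pvSwapStep_one (a b : Int) (r : List Int) :
    pvSwapStep (a :: b :: r) 1 = b :: a :: r := by
  simp [pvSwapStep]

-- the odd index 2k+1 of the k-th loop iteration
def pvIdx (k : Nat) : Int := 1 + 2 * (k : Int)

-- the loop\'s index list, written over List.range
theorem pvRange_odd (n : Nat) : PySem.List.pyRange 1 ((n : Nat) : Int) 2 =
    (List.range (n / 2)).map pvIdx := by
  rw [PySem.List.pyRange_of_pos _ _ (by norm_num : (0:Int) < 2)]
  have h : (if (1 : Int) < ((n : Nat) : Int)
      then ((((n : Nat) : Int) - 1 + 2 - 1) / 2).toNat else 0) = n / 2 := by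
    split_ifs with h
    · omega
    · omega
  rw [h]
  rfl

-- B equals the pairwise swap, by two-step structural induction (bounded by a fuel n)
theorem switch_pairs_alt_eq_aux : ∀ (n : Nat) (s : List Int), s.length ≤ n →
    switch_pairs_alt s = pvPairSwap s := by
  intro n
  induction n with
  | zero =>
      intro s h
      have : s = [] := List.eq_nil_of_length_eq_zero (Nat.le_zero.mp h)
      subst this; rfl
  | succ n ih =>
      intro s h
      match s with
      | [] => rfl
      | [a] =>
          unfold switch_pairs_alt
          rw [show (([a] : List Int).length) = 1 from rfl, pvRange_odd]
          rfl
      | a :: b :: r =>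
          unfold switch_pairs_alt
          rw [show ((a :: b :: r).length) = r.length + 2 from by simp, pvRange_odd]
          have hm : (r.length + 2) / 2 = r.length / 2 + 1 := by omega
          rw [hm, List.range_succ_eq_map, List.map_cons]
          rw [show pvIdx 0 = 1 from rfl]
          rw [List.foldl_cons, pvSwapStep_one, List.map_map]
          have hfun : List.map (pvIdx ∘ Nat.succ) (List.range (r.length / 2)) =
              ((List.range (r.length / 2)).map pvIdx).map (· + 2) := by
            rw [List.map_map]
            apply List.map_congr_left
            intro k _
            simp only [Function.comp_apply, pvIdx]
            push_cast; ring
          rw [hfun, pvFold_shift _ (by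
            intro i hi
            simp only [List.mem_map, List.mem_range] at hi
            obtain ⟨k, _, rfl⟩ := hi
            simp only [pvIdx]
            omega)]
          have hr : switch_pairs_alt r = pvPairSwap r := by
            apply ih; simp at h; omega
          unfold switch_pairs_alt at hr
          rw [pvRange_odd] at hr
          rw [hr]
          rfl

theorem switch_pairs_alt_eq_pvPairSwap (stack : List Int) :
    switch_pairs_alt stack = pvPairSwap stack :=
  switch_pairs_alt_eq_aux stack.length stack le_rfl

-- ===== VERDICT (by name: the statement is the Claim_ definition above) =====
theorem switch_pairs_spec : Claim_equal_switch_pairs := by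
  intro stack _
  unfold Spec_switch_pairs
  rw [switch_pairs_eq_pvPairSwap, switch_pairs_alt_eq_pvPairSwap]
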